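-- pv_equiv track=rewrite | github.com/HalomkoDmytro/calculate-bonus-70- | service/utils.py | second_index
-- ===== SOURCE A (Python) =====
-- def second_index(lst, element):
--     count = 0
--     for index, value in enumerate(lst):
--         if value == element:
--             count += 1
--             if count == 2:
--                 return index
--     return None
-- ===== SOURCE B (Python) =====
-- def second_index(lst, element):
--     try:
--         first = lst.index(element)
--         return lst.index(element, first + 1)
--     except ValueError:
--         return None
-- ===== Notes on version B (the rewrite author's own statement) =====
-- stated objective: idiomatic
-- what changed: Replaces the counting enumerate loop with two delegated list.index searches (second starting after the first hit) wrapped in try/except ValueError.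
import Mathlib
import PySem

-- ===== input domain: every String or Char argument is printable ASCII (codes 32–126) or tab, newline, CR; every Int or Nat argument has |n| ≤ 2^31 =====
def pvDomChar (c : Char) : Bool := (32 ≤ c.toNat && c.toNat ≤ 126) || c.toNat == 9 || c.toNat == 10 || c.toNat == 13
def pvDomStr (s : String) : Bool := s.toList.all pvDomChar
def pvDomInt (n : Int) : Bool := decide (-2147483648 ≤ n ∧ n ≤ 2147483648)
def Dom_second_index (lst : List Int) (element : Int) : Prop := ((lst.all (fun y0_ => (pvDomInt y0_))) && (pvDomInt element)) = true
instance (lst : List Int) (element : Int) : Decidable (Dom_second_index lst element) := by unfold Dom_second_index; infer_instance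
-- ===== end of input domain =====

-- Program equivalence: B replaces A's counting enumerate loop by two delegated first-occurrence
-- searches (Python list.index; the second starting after the first hit) — idiomatic decomposition.

-- ===== PORT A =====
-- the enumerate loop with its running `count`; returns the index at the second match
def secondIndexGo (element : Int) : List (Int × Int) → Int → Option Int
  | [], _ => none
  | (index, value) :: rest, count =>
    if value = element then
      (if count + 1 = 2 then some index else secondIndexGo element rest (count + 1))
    else secondIndexGo element rest count

def second_index (lst : List Int) (element : Int) : Option Int :=
  secondIndexGo element (PySem.List.enumerate lst) 0

-- ===== PORT B =====
-- lst.index(element, first + 1) is exact as: search lst with the first `first + 1` items dropped,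
-- and add the offset back to make the index absolute (Python raising ValueError = index? none).
def second_index_alt (lst : List Int) (element : Int) : Option Int :=
  match PySem.List.index? lst element with
  | none => none
  | some first =>
    match PySem.List.index? (lst.drop (first + 1)) element with
    | none => none
    | some j => some ((first : Int) + 1 + (j : Int))

-- ===== PRECONDITION & SPEC =====
def Spec_second_index (lst : List Int) (element : Int) (out : Option Int) : Prop := out = second_index_alt lst element
instance (lst : List Int) (element : Int) (out : Option Int) : Decidable (Spec_second_index lst element out) := by unfold Spec_second_index; infer_instance

-- ===== CLAIM (what is proved, stated in full; the proofs are below) =====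
def Claim_equal_second_index : Prop := ∀ (lst : List Int) (element : Int), Dom_second_index lst element → Spec_second_index lst element (second_index lst element)

-- ===== LEMMAS AND PROOFS =====

-- once one occurrence is seen (count = 1), the loop returns the index of the next match
theorem go_one (element : Int) (xs : List Int) (s : Int) :
    secondIndexGo element (PySem.List.enumerate xs s) 1 =
      Option.map (fun j : Nat => s + (j : Int)) (PySem.List.index? xs element) := by
  induction xs generalizing s with
  | nil => simp [secondIndexGo, PySem.List.enumerate_nil]
  | cons x xs ih =>
    rw [PySem.List.enumerate_cons]
    by_cases hx : x = element
    · subst hx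
      rw [PySem.List.index?_cons_self]
      simp [secondIndexGo]
    · rw [PySem.List.index?_cons_of_ne _ hx]
      simp only [secondIndexGo, if_neg hx, ih]
      cases PySem.List.index? xs element with
      | none => rfl
      | some j =>
        simp only [Option.map_some, Option.some.injEq, Nat.cast_add, Nat.cast_one]
        ring

-- with count = 0 the loop computes exactly B's two-search composition
theorem go_zero (element : Int) (xs : List Int) (s : Int) :
    secondIndexGo element (PySem.List.enumerate xs s) 0 =
      (match PySem.List.index? xs element with
       | none => none
       | some first =>
         match PySem.List.index? (xs.drop (first + 1)) element with
         | none => none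
         | some j => some (s + (first : Int) + 1 + (j : Int))) := by
  induction xs generalizing s with
  | nil => simp [secondIndexGo, PySem.List.enumerate_nil]
  | cons x xs ih =>
    rw [PySem.List.enumerate_cons]
    by_cases hx : x = element
    · subst hx
      rw [PySem.List.index?_cons_self]
      have hL : secondIndexGo x ((s, x) :: PySem.List.enumerate xs (s + 1)) 0 =
          secondIndexGo x (PySem.List.enumerate xs (s + 1)) 1 := by
        simp [secondIndexGo]
      rw [hL, go_one]
      show _ = (match PySem.List.index? (List.drop (0 + 1) (x :: xs)) x with
        | none => none
        | some j => some (s + ((0 : Nat) : Int) + 1 + (j : Int)))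
      have hd : List.drop (0 + 1) (x :: xs) = xs := rfl
      rw [hd]
      cases PySem.List.index? xs x with
      | none => rfl
      | some j =>
        simp only [Option.map_some, Option.some.injEq, Nat.cast_zero]
        ring
    · rw [PySem.List.index?_cons_of_ne _ hx]
      simp only [secondIndexGo, if_neg hx, ih]
      cases PySem.List.index? xs element with
      | none => rfl
      | some first =>
        simp only [Option.map_some]
        show (match PySem.List.index? (List.drop (first + 1) xs) element with
          | none => none
          | some j => some (s + 1 + (first : Int) + 1 + (j : Int))) =
          (match PySem.List.index? (List.drop (first + 1 + 1) (x :: xs)) element with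
          | none => none
          | some j => some (s + ((first + 1 : Nat) : Int) + 1 + (j : Int)))
        have hd : List.drop (first + 1 + 1) (x :: xs) = List.drop (first + 1) xs := rfl
        rw [hd]
        cases PySem.List.index? (List.drop (first + 1) xs) element with
        | none => rfl
        | some j =>
          simp only [Option.some.injEq, Nat.cast_add, Nat.cast_one]
          ring

-- ===== VERDICT (by name: the statement is the Claim_ definition above) =====
theorem second_index_spec : Claim_equal_second_index := by
  intro lst element _
  show second_index lst element = second_index_alt lst element
  unfold second_index second_index_alt
  rw [go_zero]
  cases PySem.List.index? lst element with
  | none => rfl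
  | some first =>
    simp only
    cases PySem.List.index? (lst.drop (first + 1)) element with
    | none => rfl
    | some j => simp only [Option.some.injEq]; ring
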